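-- pv_equiv track=rewrite | github.com/Lhaj3/door-converter | door.py | binary_to_door
-- ===== SOURCE A (Python) =====
-- def binary_to_door(input_string):
--     newstring = ""
--     counter = 0
--     for c in input_string:
--         newchar = ''
--         if(counter == 0):
--             newchar = 'd'
--         if(counter == 1):
--             newchar = 'o'
--         if(counter == 2):
--             newchar = 'o'
--         if(counter == 3):
--             newchar = 'r'
--         if c == '1':
--             newchar = newchar.capitalize()
--         newstring = newstring + newchar
--         if counter == 3:
--             newstring = newstring + " "
--         counter += 1
--         if counter == 4:
--             counter = 0
--     return newstring
-- ===== SOURCE B (Python) =====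
-- def binary_to_door(input_string):
--     parts = []
--     for i in range(0, len(input_string), 4):
--         chunk = input_string[i:i+4]
--         for j, c in enumerate(chunk):
--             parts.append("DOOR"[j] if c == '1' else "door"[j])
--         if len(chunk) == 4:
--             parts.append(' ')
--     return ''.join(parts)
-- ===== Notes on version B (the rewrite author's own statement) =====
-- stated objective: simpler
-- what changed: B walks the input in 4-character chunks and maps each within-chunk position to the corresponding word letter (uppercased on a one-bit), appending the space per full chunk, instead of A's single-pass loop with a mod-4 counter, a per-character if-chain and capitalize.
import Mathlib
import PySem

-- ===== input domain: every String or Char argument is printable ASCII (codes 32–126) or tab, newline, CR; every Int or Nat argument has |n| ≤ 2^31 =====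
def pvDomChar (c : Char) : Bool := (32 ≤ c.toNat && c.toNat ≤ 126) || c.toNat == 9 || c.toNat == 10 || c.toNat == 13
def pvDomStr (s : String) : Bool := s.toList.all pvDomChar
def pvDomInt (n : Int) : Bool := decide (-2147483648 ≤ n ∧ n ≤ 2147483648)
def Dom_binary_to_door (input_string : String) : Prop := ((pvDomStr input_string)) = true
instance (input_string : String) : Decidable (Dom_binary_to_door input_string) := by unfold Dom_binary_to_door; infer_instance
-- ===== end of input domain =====

-- B rewrites A's mod-4 counter loop as a chunked two-level pass (simpler decomposition); return values are equal on all inputs.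

-- ===== PORT A =====
-- str.capitalize for ASCII strings: first char uppercased, rest lowercased (exact on ASCII)
def pyCapitalize : List Char → List Char
  | [] => []
  | c :: cs => c.toUpper :: cs.map Char.toLower

-- one iteration of A's loop body; state = (newstring, counter)
def doorStep (st : List Char × Int) (c : Char) : List Char × Int :=
  let newchar : List Char := []
  let newchar := if st.2 = 0 then ['d'] else newchar
  let newchar := if st.2 = 1 then ['o'] else newchar
  let newchar := if st.2 = 2 then ['o'] else newchar
  let newchar := if st.2 = 3 then ['r'] else newchar
  let newchar := if c = '1' then pyCapitalize newchar else newchar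
  let newstring := st.1 ++ newchar
  let newstring := if st.2 = 3 then newstring ++ [' '] else newstring
  let counter := st.2 + 1
  let counter := if counter = 4 then 0 else counter
  (newstring, counter)

def binary_to_door (input_string : String) : String :=
  String.ofList (input_string.toList.foldl doorStep ([], 0)).1

-- ===== PORT B =====
-- render one chunk: "DOOR"[j] / "door"[j] per character, plus a space iff the chunk is full
def doorChunk (chunk : List Char) : List Char :=
  (chunk.zipIdx.map (fun p =>
    if p.1 = '1' then ['D','O','O','R'].getD p.2 ' ' else ['d','o','o','r'].getD p.2 ' '))
  ++ (if chunk.length = 4 then [' '] else [])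

def doorChunks (l : List Char) : List Char :=
  if l = [] then [] else doorChunk (l.take 4) ++ doorChunks (l.drop 4)
termination_by l.length
decreasing_by cases l with
  | nil => simp_all
  | cons a t => simp

def binary_to_door_alt (input_string : String) : String :=
  String.ofList (doorChunks input_string.toList)

-- ===== PRECONDITION & SPEC =====
def Spec_binary_to_door (input_string : String) (out : String) : Prop := out = binary_to_door_alt input_string
instance (input_string : String) (out : String) : Decidable (Spec_binary_to_door input_string out) := by unfold Spec_binary_to_door; infer_instance

-- ===== CLAIM (what is proved, stated in full; the proofs are below) =====
def Claim_equal_binary_to_door : Prop := ∀ (input_string : String), Dom_binary_to_door input_string → Spec_binary_to_door input_string (binary_to_door input_string)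

-- ===== LEMMAS AND PROOFS =====

-- the letter B emits for the character c at chunk position j
def upperAt (c : Char) (j : Nat) : Char :=
  if c = '1' then ['D','O','O','R'].getD j ' ' else ['d','o','o','r'].getD j ' '

theorem doorStep_at (acc : List Char) (j : Int) (c : Char) :
    doorStep (acc, j) c =
      (acc ++ (if j = 0 then [upperAt c 0] else if j = 1 then [upperAt c 1]
        else if j = 2 then [upperAt c 2] else if j = 3 then [upperAt c 3, ' ']
        else ([] : List Char)),
       if j + 1 = 4 then 0 else j + 1) := by
  simp only [doorStep, upperAt, pyCapitalize]
  by_cases h0 : j = 0 <;> by_cases h1 : j = 1 <;> by_cases h2 : j = 2 <;> by_cases h3 : j = 3 <;>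
    by_cases hc : c = '1' <;> simp_all

theorem foldl_chunk4 (a b c d : Char) (rest acc : List Char) :
    (((a :: b :: c :: d :: rest).foldl doorStep (acc, 0))) =
      rest.foldl doorStep (acc ++ doorChunk [a, b, c, d], 0) := by
  simp only [List.foldl, doorStep_at, doorChunk, List.zipIdx, List.map, upperAt]
  norm_num [List.append_assoc]

theorem foldl_small (l acc : List Char) (h : l.length < 4) :
    ((l.foldl doorStep (acc, 0))).1 = acc ++ doorChunk l := by
  match l with
  | [] => simp [doorChunk]
  | [a] => simp [List.foldl, doorStep_at, doorChunk, List.zipIdx, upperAt]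
  | [a, b] => simp [List.foldl, doorStep_at, doorChunk, List.zipIdx, upperAt, List.append_assoc]
  | [a, b, c] =>
      simp [List.foldl, doorStep_at, doorChunk, List.zipIdx, upperAt, List.append_assoc]
  | a :: b :: c :: d :: t => simp at h; omega

theorem doorChunks_cons4 (a b c d : Char) (t : List Char) :
    doorChunks (a :: b :: c :: d :: t) = doorChunk [a, b, c, d] ++ doorChunks t := by
  rw [doorChunks]
  cases t with
  | nil => simp [doorChunks]
  | cons x xs => simp

theorem foldl_eq_chunks (l acc : List Char) :
    ((l.foldl doorStep (acc, 0))).1 = acc ++ doorChunks l := by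
  by_cases h : l.length < 4
  · rw [foldl_small l acc h, doorChunks]
    match l with
    | [] => simp [doorChunk]
    | a :: t =>
        have : (a :: t).take 4 = a :: t := List.take_of_length_le (by omega)
        have hd : (a :: t).drop 4 = [] := List.drop_eq_nil_of_le (by simp at h ⊢; omega)
        simp [this, hd, doorChunks]
  · match l with
    | a :: b :: c :: d :: t =>
        rw [foldl_chunk4, foldl_eq_chunks t, doorChunks_cons4]
        simp [List.append_assoc]
    | [] | [_] | [_,_] | [_,_,_] => simp_all
termination_by l.length
decreasing_by simp; omega

-- ===== VERDICT (by name: the statement is the Claim_ definition above) =====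
theorem binary_to_door_spec : Claim_equal_binary_to_door := by
  intro s _
  unfold Spec_binary_to_door binary_to_door binary_to_door_alt
  rw [foldl_eq_chunks]
  simp
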